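-- pv_equiv track=rewrite | github.com/zhanglabtools/ConsTADs | ConsTADs_script/Fig1_tad_calling_method_comparison.py | chr_cut
-- ===== SOURCE A (Python) =====
-- def chr_cut(chr_length, chr_symbol, resolution, chr_ref):
--      start_pos = 0
--      start = []
--      end = []
--      name_list = []
--      while (start_pos + resolution) <= chr_length:
--           start.append(start_pos)
--           end.append(start_pos + resolution)
--           start_pos += resolution
--      start.append(start_pos)
--      end.append(chr_length)
--      for i in range(len(start)):
--           name_list.append(chr_symbol + ':' + str(start[i]) + '-' + str(end[i]))
--      return name_list
-- ===== SOURCE B (Python) =====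
-- def chr_cut(chr_length, chr_symbol, resolution, chr_ref):
--     # number of full bins, computed arithmetically instead of stepping
--     n = (chr_length - resolution) // resolution + 1 if chr_length >= resolution else 0
--     bins = [chr_symbol + ':' + str(i * resolution) + '-' + str((i + 1) * resolution)
--             for i in range(n)]
--     bins.append(chr_symbol + ':' + str(n * resolution) + '-' + str(chr_length))
--     return bins
-- ===== Notes on version B (the rewrite author's own statement) =====
-- stated objective: simpler
-- what changed: B replaces the stepping while-loop with parallel start/end lists by an arithmetic bin count n = (chr_length-resolution)//resolution+1 (0 if chr_length<resolution) and a single index-based comprehension plus the trailing bin; Pre_ excludes only resolution<=0 with chr_length>=resolution, where A loops forever.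
import Mathlib
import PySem

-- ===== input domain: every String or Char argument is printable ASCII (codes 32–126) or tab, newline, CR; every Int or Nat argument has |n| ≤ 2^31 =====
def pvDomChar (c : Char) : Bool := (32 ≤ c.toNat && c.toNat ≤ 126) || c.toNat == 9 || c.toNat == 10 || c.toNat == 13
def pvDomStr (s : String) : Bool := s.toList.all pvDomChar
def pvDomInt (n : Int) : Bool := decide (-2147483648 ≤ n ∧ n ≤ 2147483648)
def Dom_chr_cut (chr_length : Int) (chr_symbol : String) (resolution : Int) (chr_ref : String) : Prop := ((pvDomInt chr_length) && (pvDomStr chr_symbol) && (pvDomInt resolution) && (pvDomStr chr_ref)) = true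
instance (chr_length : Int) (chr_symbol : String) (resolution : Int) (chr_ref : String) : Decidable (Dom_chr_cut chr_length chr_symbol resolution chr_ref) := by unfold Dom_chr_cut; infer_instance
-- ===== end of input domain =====

-- B replaces A's stepping while-loop (parallel start/end lists) by an arithmetic bin
-- count and one index-based pass (objective: simpler).

-- ===== PORT A =====
-- the while-loop; fuel only makes the recursion total (it never runs out inside Pre_)
def chr_cut_loopA (chr_length resolution : Int) : Nat → Int → List Int → List Int → List Int × List Int × Int
  | 0, start_pos, start, «end» => (start, «end», start_pos)
  | f + 1, start_pos, start, «end» =>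
    if start_pos + resolution ≤ chr_length then
      chr_cut_loopA chr_length resolution f (start_pos + resolution)
        (start ++ [start_pos]) («end» ++ [start_pos + resolution])
    else (start, «end», start_pos)

def chr_cut (chr_length : Int) (chr_symbol : String) (resolution : Int) (chr_ref : String) : List String :=
  let r := chr_cut_loopA chr_length resolution (chr_length.toNat + 1) 0 [] []
  let start := r.1 ++ [r.2.2]
  let «end» := r.2.1 ++ [chr_length]
  (List.range start.length).foldl
    (fun name_list i =>
      name_list ++ [chr_symbol ++ ":" ++ PySem.Int.toStr (start.getD i 0) ++ "-" ++ PySem.Int.toStr («end».getD i 0)]) []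

-- ===== PORT B =====
def chr_cut_alt (chr_length : Int) (chr_symbol : String) (resolution : Int) (chr_ref : String) : List String :=
  let n : Int := if chr_length ≥ resolution then PySem.Int.floordiv (chr_length - resolution) resolution + 1 else 0
  ((PySem.List.pyRange 0 n 1).map
     (fun i => chr_symbol ++ ":" ++ PySem.Int.toStr (i * resolution) ++ "-" ++ PySem.Int.toStr ((i + 1) * resolution)))
  ++ [chr_symbol ++ ":" ++ PySem.Int.toStr (n * resolution) ++ "-" ++ PySem.Int.toStr chr_length]

-- ===== PRECONDITION & SPEC =====
-- Pre_ excludes exactly resolution ≤ 0 with chr_length ≥ resolution, where A's while-loop never terminates.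
def Pre_chr_cut (chr_length : Int) (chr_symbol : String) (resolution : Int) (chr_ref : String) : Prop :=
  0 < resolution ∨ chr_length < resolution
instance (chr_length : Int) (chr_symbol : String) (resolution : Int) (chr_ref : String) : Decidable (Pre_chr_cut chr_length chr_symbol resolution chr_ref) := by unfold Pre_chr_cut; infer_instance
def pvWitness_chr_cut : Int × String × Int × String := (25, "chr1", 10, "ref")

def Spec_chr_cut (chr_length : Int) (chr_symbol : String) (resolution : Int) (chr_ref : String) (out : List String) : Prop := out = chr_cut_alt chr_length chr_symbol resolution chr_ref
instance (chr_length : Int) (chr_symbol : String) (resolution : Int) (chr_ref : String) (out : List String) : Decidable (Spec_chr_cut chr_length chr_symbol resolution chr_ref out) := by unfold Spec_chr_cut; infer_instance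

-- ===== CLAIM (what is proved, stated in full; the proofs are below) =====
def Claim_equal_chr_cut : Prop := ∀ (chr_length : Int) (chr_symbol : String) (resolution : Int) (chr_ref : String), Dom_chr_cut chr_length chr_symbol resolution chr_ref → Pre_chr_cut chr_length chr_symbol resolution chr_ref → Spec_chr_cut chr_length chr_symbol resolution chr_ref (chr_cut chr_length chr_symbol resolution chr_ref)

-- ===== LEMMAS AND PROOFS =====

theorem foldl_app_singleton {α β : Type} (f : α → β) :
    ∀ (l : List α) (acc : List β), l.foldl (fun a x => a ++ [f x]) acc = acc ++ l.map f := by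
  intro l
  induction l with
  | nil => simp [List.foldl]
  | cons x xs ih => intro acc; simp [List.foldl, ih]

theorem loopA_spec (L res : Int) (hres : 0 < res) :
    ∀ (j f : Nat) (p : Int) (s e : List Int),
      p + (j : Int) * res ≤ L → L < p + ((j : Int) + 1) * res → j < f →
      chr_cut_loopA L res f p s e =
        (s ++ (List.range j).map (fun (i : Nat) => p + (i : Int) * res),
         e ++ (List.range j).map (fun (i : Nat) => p + ((i : Int) + 1) * res),
         p + (j : Int) * res) := by
  intro j
  induction j with
  | zero =>
    intro f p s e h1 h2 hf
    obtain ⟨f', rfl⟩ : ∃ f', f = f' + 1 := ⟨f - 1, by omega⟩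
    simp at h1 h2
    simp [chr_cut_loopA, (show ¬ p + res ≤ L by omega)]
  | succ j ih =>
    intro f p s e h1 h2 hf
    obtain ⟨f', rfl⟩ : ∃ f', f = f' + 1 := ⟨f - 1, by omega⟩
    have hjres : 0 ≤ (j : Int) * res := mul_nonneg (Int.natCast_nonneg j) hres.le
    have hcond : p + res ≤ L := by push_cast at h1; nlinarith
    rw [chr_cut_loopA, if_pos hcond,
      ih f' (p + res) (s ++ [p]) (e ++ [p + res]) (by push_cast at h1 ⊢; linarith)
        (by push_cast at h2 ⊢; linarith) (by omega)]
    refine congrArg₂ _ ?_ (congrArg₂ _ ?_ (by push_cast; ring))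
    all_goals
      rw [List.range_succ_eq_map, List.map_cons, List.map_map]
      simp only [List.append_assoc, List.singleton_append]
      congr 1
      refine List.cons_eq_cons.mpr ⟨by push_cast; ring, List.map_congr_left fun i _ => ?_⟩
      simp only [Function.comp, Nat.succ_eq_add_one]
      push_cast; ring

-- ===== VERDICT (by name: the statement is the Claim_ definition above) =====

theorem chr_cut_spec : Claim_equal_chr_cut := by
  intro L sym res ref _ hpre
  unfold Spec_chr_cut chr_cut chr_cut_alt
  dsimp only
  by_cases hL : L ≥ res
  · -- at least one full bin; Pre_ forces 0 < res
    have hres : 0 < res := by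
      rcases hpre with h | h
      · exact h
      · omega
    rw [if_pos hL]
    set m := PySem.Int.floordiv (L - res) res with hm
    set n := m + 1 with hn
    have hmod := PySem.Int.floordiv_mul_add_mod (L - res) res
    rw [PySem.Int.mod_eq_emod_of_pos hres] at hmod
    have hr0 : 0 ≤ (L - res) % res := Int.emod_nonneg _ (by omega)
    have hr1 : (L - res) % res < res := Int.emod_lt_of_pos _ hres
    have hm0 : 0 ≤ m := by
      rw [hm, PySem.Int.floordiv_eq_ediv_of_pos hres]
      exact Int.ediv_nonneg (by omega) hres.le
    have hub : n * res ≤ L := by rw [hn]; nlinarith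
    have hub2 : L < (n + 1) * res := by rw [hn]; nlinarith
    have hnn : 1 ≤ n := by omega
    have hnL : n ≤ L := by nlinarith
    have hjcast : ((n.toNat : Int)) = n := Int.toNat_of_nonneg (by omega)
    have hloop := loopA_spec L res hres n.toNat (L.toNat + 1) 0 [] []
      (by rw [hjcast]; omega) (by rw [hjcast]; omega) (by omega)
    rw [hloop]
    simp only [List.nil_append, zero_add]
    rw [foldl_app_singleton]
    rw [PySem.List.pyRange_one]
    simp only [List.nil_append, Int.sub_zero, List.length_append, List.length_map,
      List.length_range, List.length_cons, List.length_nil]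
    rw [List.range_succ, List.map_append, List.map_map]
    congr 1
    · apply List.map_congr_left
      intro i hi
      rw [List.mem_range] at hi
      rw [List.getD_append _ _ _ _ (by simp [hi]), List.getD_append _ _ _ _ (by simp [hi])]
      rw [List.getD_eq_getElem _ _ (by simp [hi]), List.getD_eq_getElem _ _ (by simp [hi])]
      simp
    · simp only [List.map_cons, List.map_nil]
      rw [List.getD_append_right _ _ _ _ (by simp), List.getD_append_right _ _ _ _ (by simp)]
      simp [hjcast]
  · -- no full bin: the loop body never runs
    have hcond : ¬ (0 + res ≤ L) := by omega
    rw [if_neg hL]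
    have : chr_cut_loopA L res (L.toNat + 1) 0 [] [] = ([], [], 0) := by
      rw [chr_cut_loopA, if_neg hcond]
    rw [this]
    simp [PySem.List.pyRange, List.range_succ]
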